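-- pv_equiv track=rewrite | github.com/TheClitCommander/Minerva | web/multi_model_processor.py | prioritize_models_for_query
-- ===== SOURCE A (Python) =====
-- from typing import Dict, List, Tuple, Any, Optional
--
-- def prioritize_models_for_query(query_type: str, complexity: int, available_models: List[str]) -> List[str]:
--     '''
--     Prioritize models based on query type and complexity.
--
--     Args:
--         query_type: Type of the query (technical, creative, analytical, factual)
--         complexity: Complexity score of the query (1-10)
--         available_models: List of available models
--
--     Returns:
--         Prioritized list of models
--     '''
--     # Define priority models for each query type
--     priority_mapping = {
--         "technical": ["gpt-4", "claude-3", "gemini", "mistral"],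
--         "creative": ["claude-3", "gpt-4", "gemini", "mistral"],
--         "analytical": ["gpt-4", "claude-3", "gemini", "mistral"],
--         "factual": ["gemini", "gpt-4", "claude-3", "mistral"]
--     }
--
--     # For high complexity queries, adjust priority
--     if complexity >= 8:
--         high_complexity_order = ["gpt-4", "claude-3", "gemini", "mistral"]
--
--         # Get the base priority list for the query type
--         base_priority = priority_mapping.get(query_type, ["gpt-4", "claude-3", "gemini", "mistral"])
--
--         # Blend the two lists, with high complexity having more weight
--         priority_models = []
--         for model in high_complexity_order:
--             if model in available_models:
--                 priority_models.append(model)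
--
--         # Add any remaining models from the base priority if not already added
--         for model in base_priority:
--             if model in available_models and model not in priority_models:
--                 priority_models.append(model)
--     else:
--         # Use the standard priority for this query type
--         standard_priority = priority_mapping.get(query_type, ["gpt-4", "claude-3", "gemini", "mistral"])
--         priority_models = [model for model in standard_priority if model in available_models]
--
--     # Ensure all available models are included
--     for model in available_models:
--         if model not in priority_models:
--             priority_models.append(model)
--
--     return priority_models
-- ===== SOURCE B (Python) =====
-- def prioritize_models_for_query(query_type: str, complexity: int, available_models):
--     default = ["gpt-4", "claude-3", "gemini", "mistral"]
--     priority_mapping = {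
--         "technical": default,
--         "creative": ["claude-3", "gpt-4", "gemini", "mistral"],
--         "analytical": default,
--         "factual": ["gemini", "gpt-4", "claude-3", "mistral"],
--     }
--     order = default if complexity >= 8 else priority_mapping.get(query_type, default)
--     rank = {m: i for i, m in enumerate(order)}
--     deduped = list(dict.fromkeys(available_models))
--     return sorted(deduped, key=lambda m: rank.get(m, len(order)))
-- ===== Notes on version B (the rewrite author's own statement) =====
-- stated objective: faster
-- what changed: B replaces A's three accumulator loops (whose 'not in priority_models' list scans are quadratic) with the standard recipe: pick the single effective priority order (the high-complexity blend collapses to it), build a rank dict from enumerate(order), dedup available_models once with dict.fromkeys, and stably sort the deduped list by rank so unknown models rank last and keep input order.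
import Mathlib
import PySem

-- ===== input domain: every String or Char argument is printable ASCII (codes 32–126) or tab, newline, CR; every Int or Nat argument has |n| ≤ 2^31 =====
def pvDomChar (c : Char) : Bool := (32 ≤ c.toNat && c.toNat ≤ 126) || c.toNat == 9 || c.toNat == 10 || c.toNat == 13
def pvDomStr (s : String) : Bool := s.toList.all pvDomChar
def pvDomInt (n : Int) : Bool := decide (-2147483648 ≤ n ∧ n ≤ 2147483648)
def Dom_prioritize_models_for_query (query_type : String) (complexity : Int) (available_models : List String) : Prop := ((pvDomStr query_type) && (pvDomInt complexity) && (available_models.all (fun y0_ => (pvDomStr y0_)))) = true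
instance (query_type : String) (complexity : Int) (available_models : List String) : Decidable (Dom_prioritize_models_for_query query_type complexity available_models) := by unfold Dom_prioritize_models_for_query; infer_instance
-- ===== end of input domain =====

-- B picks the one effective priority order, builds a rank dict from enumerate(order), dedups
-- available_models once via dict.fromkeys, and stably sorts the deduped list by rank — replacing
-- A's three accumulator loops with the standard sort-by-key recipe.

-- ===== PORT A =====
def prioritize_models_for_query (query_type : String) (complexity : Int) (available_models : List String) : List String :=
  let priority_mapping : PySem.Dict String (List String) :=
    PySem.Dict.ofList
      [("technical", ["gpt-4", "claude-3", "gemini", "mistral"]),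
       ("creative", ["claude-3", "gpt-4", "gemini", "mistral"]),
       ("analytical", ["gpt-4", "claude-3", "gemini", "mistral"]),
       ("factual", ["gemini", "gpt-4", "claude-3", "mistral"])]
  let priority_models :=
    if complexity ≥ 8 then
      let high_complexity_order := ["gpt-4", "claude-3", "gemini", "mistral"]
      let base_priority := priority_mapping.getD query_type ["gpt-4", "claude-3", "gemini", "mistral"]
      -- for model in high_complexity_order: if model in available_models: append
      let priority_models₀ := high_complexity_order.foldl
        (fun acc m => if available_models.contains m then acc ++ [m] else acc) []
      -- for model in base_priority: if model in available_models and model not in priority_models: append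
      base_priority.foldl
        (fun acc m => if available_models.contains m && !(acc.contains m) then acc ++ [m] else acc)
        priority_models₀
    else
      -- [model for model in standard_priority if model in available_models]
      (priority_mapping.getD query_type ["gpt-4", "claude-3", "gemini", "mistral"]).filter
        (fun m => available_models.contains m)
  -- for model in available_models: if model not in priority_models: append
  available_models.foldl
    (fun acc m => if !(acc.contains m) then acc ++ [m] else acc) priority_models

-- ===== PORT B =====
def prioritize_models_for_query_alt (query_type : String) (complexity : Int) (available_models : List String) : List String :=
  let dflt := ["gpt-4", "claude-3", "gemini", "mistral"]
  let priority_mapping : PySem.Dict String (List String) :=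
    PySem.Dict.ofList
      [("technical", dflt),
       ("creative", ["claude-3", "gpt-4", "gemini", "mistral"]),
       ("analytical", dflt),
       ("factual", ["gemini", "gpt-4", "claude-3", "mistral"])]
  let order := if complexity ≥ 8 then dflt else priority_mapping.getD query_type dflt
  -- rank = {m: i for i, m in enumerate(order)}
  let rank : PySem.Dict String Int :=
    (PySem.List.enumerate order).foldl (fun acc p => acc.insert p.2 p.1) PySem.Dict.empty
  let deduped := PySem.List.dedup available_models   -- list(dict.fromkeys(available_models))
  PySem.List.sorted deduped (fun m => rank.getD m (order.length : Int)) false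

-- ===== PRECONDITION & SPEC =====
def Spec_prioritize_models_for_query (query_type : String) (complexity : Int) (available_models : List String) (out : List String) : Prop := out = prioritize_models_for_query_alt query_type complexity available_models
instance (query_type : String) (complexity : Int) (available_models : List String) (out : List String) : Decidable (Spec_prioritize_models_for_query query_type complexity available_models out) := by unfold Spec_prioritize_models_for_query; infer_instance

-- ===== CLAIM (what is proved, stated in full; the proofs are below) =====
def Claim_equal_prioritize_models_for_query : Prop := ∀ (query_type : String) (complexity : Int) (available_models : List String), Dom_prioritize_models_for_query query_type complexity available_models → Spec_prioritize_models_for_query query_type complexity available_models (prioritize_models_for_query query_type complexity available_models)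

-- ===== LEMMAS AND PROOFS =====

def pvDflt : List String := ["gpt-4", "claude-3", "gemini", "mistral"]

def pvMapping : PySem.Dict String (List String) :=
  PySem.Dict.ofList
    [("technical", ["gpt-4", "claude-3", "gemini", "mistral"]),
     ("creative", ["claude-3", "gpt-4", "gemini", "mistral"]),
     ("analytical", ["gpt-4", "claude-3", "gemini", "mistral"]),
     ("factual", ["gemini", "gpt-4", "claude-3", "mistral"])]

-- the mapping lookup yields one of three concrete four-model orders
lemma getD_mapping_cases (qt : String) :
    pvMapping.getD qt pvDflt = pvDflt ∨
      pvMapping.getD qt pvDflt = ["claude-3", "gpt-4", "gemini", "mistral"] ∨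
      pvMapping.getD qt pvDflt = ["gemini", "gpt-4", "claude-3", "mistral"] := by
  have h : pvMapping = PySem.Dict.mk
    [("technical", ["gpt-4", "claude-3", "gemini", "mistral"]),
     ("creative", ["claude-3", "gpt-4", "gemini", "mistral"]),
     ("analytical", ["gpt-4", "claude-3", "gemini", "mistral"]),
     ("factual", ["gemini", "gpt-4", "claude-3", "mistral"])] := by decide
  rw [h, PySem.Dict.getD_eq_get?_getD]
  simp only [PySem.Dict.get?_mk_cons]
  split_ifs <;> simp [Option.getD, PySem.Dict.get?, pvDflt]

-- A's dedup-append loop, from an arbitrary start list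
lemma step_eq_add : (fun (acc : List String) m => if !(acc.contains m) then acc ++ [m] else acc) = PySem.Set.add := by
  funext acc m
  simp only [PySem.Set.add]
  cases h : acc.contains m <;> simp [List.contains_eq_mem] at h <;> simp [h]

lemma foldl_dedup_from (l p : List String) :
    l.foldl (fun acc m => if !(acc.contains m) then acc ++ [m] else acc) p
      = p ++ (PySem.List.dedup l).filter (fun m => !(p.contains m)) := by
  rw [step_eq_add]
  induction l generalizing p with
  | nil => simp [PySem.List.dedup, PySem.Set.ofList]
  | cons x t ih =>
    have hd : PySem.List.dedup (x :: t)
        = [x] ++ (PySem.List.dedup t).filter (fun m => !(([x] : List String).contains m)) := by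
      show List.foldl PySem.Set.add PySem.Set.empty (x :: t) = _
      rw [List.foldl_cons]
      have h1 : PySem.Set.add PySem.Set.empty x = [x] := by
        simp [PySem.Set.add, PySem.Set.empty, PySem.Set.contains]
      rw [h1]
      exact ih [x]
    rw [List.foldl_cons, ih, hd]
    by_cases h : x ∈ p
    · have hx : PySem.Set.add p x = p := by simp [PySem.Set.add, PySem.Set.contains, h]
      rw [hx]
      simp only [List.filter_append]
      congr 1
      have h2 : List.filter (fun m => !p.contains m) [x] = [] := by simp [h]
      rw [h2]
      simp only [List.nil_append, List.filter_filter]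
      apply List.filter_congr
      intro m _
      by_cases hm : m ∈ p
      · simp [hm]
      · simp [hm]
        intro he; exact hm (he ▸ h)
    · have hx : PySem.Set.add p x = p ++ [x] := by simp [PySem.Set.add, PySem.Set.contains, h]
      rw [hx]
      simp only [List.filter_append, List.append_assoc]
      congr 1
      have h2 : List.filter (fun m => !p.contains m) [x] = [x] := by simp [h]
      rw [h2]
      simp only [List.cons_append, List.nil_append, List.filter_filter]
      congr 1
      apply List.filter_congr
      intro m _
      by_cases hm : m ∈ p <;> by_cases hmx : m = x <;>
        simp [hm, hmx]

lemma filter_beq_of_nodup (d : List String) (hd : d.Nodup) (o : String) :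
    d.filter (fun m => m == o) = if o ∈ d then [o] else [] := by
  induction d with
  | nil => simp
  | cons x t ih =>
    have hnd := (List.nodup_cons.mp hd).2
    have hx := (List.nodup_cons.mp hd).1
    by_cases hxo : x = o
    · subst hxo
      have : t.filter (fun m => m == x) = [] := by
        apply List.filter_eq_nil_iff.mpr
        intro m hm hb
        exact hx ((eq_of_beq hb) ▸ hm)
      simp [this]
    · have : (x == o) = false := by simpa using hxo
      simp only [List.filter_cons, this, Bool.false_eq_true, ih hnd]
      have hox : ¬ o = x := fun h => hxo h.symm
      simp [hox]

lemma flatMap_filter_eq (order d : List String) (hd : d.Nodup) :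
    order.flatMap (fun o => d.filter (fun m => m == o))
      = order.filter (fun o => d.contains o) := by
  induction order with
  | nil => simp
  | cons o os ih =>
    rw [List.flatMap_cons, ih, filter_beq_of_nodup d hd o, List.filter_cons]
    by_cases h : o ∈ d <;> simp [h]

lemma blend_loop_id (avail base dflt : List String)
    (hb : ∀ m ∈ base, m ∈ dflt) :
    base.foldl
      (fun acc m => if avail.contains m && !(acc.contains m) then acc ++ [m] else acc)
      (dflt.filter (fun m => avail.contains m))
      = dflt.filter (fun m => avail.contains m) := by
  induction base with
  | nil => simp
  | cons m t ih =>
    rw [List.foldl_cons]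
    have hmem : m ∈ dflt := hb m (by simp)
    have hc : (avail.contains m && !((dflt.filter (fun x => avail.contains x)).contains m)) = false := by
      by_cases ha : avail.contains m
      · have hmf : m ∈ dflt.filter (fun x => avail.contains x) := List.mem_filter.mpr ⟨hmem, ha⟩
        simp
        exact fun h => ⟨hmem, h⟩
      · simp
        exact fun h => ⟨hmem, h⟩
    rw [hc]
    simp only [Bool.false_eq_true, if_false]
    exact ih (fun x hx => hb x (by simp [hx]))

-- A's result in flatMap-of-filters form
lemma main_identity (order avail : List String) :
    avail.foldl (fun acc m => if !(acc.contains m) then acc ++ [m] else acc)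
        (order.filter (fun m => avail.contains m))
      = (order.flatMap (fun o => (PySem.List.dedup avail).filter (fun m => m == o)))
          ++ (PySem.List.dedup avail).filter (fun m => !(order.contains m)) := by
  rw [foldl_dedup_from, flatMap_filter_eq _ _ (PySem.List.nodup_dedup avail)]
  congr 1
  · apply List.filter_congr
    intro o _
    simp
  · apply List.filter_congr
    intro m hm
    have hma : m ∈ avail := (PySem.List.mem_dedup avail m).mp hm
    by_cases ho : m ∈ order
    · have : m ∈ order.filter (fun x => avail.contains x) :=
        List.mem_filter.mpr ⟨ho, by simpa using hma⟩
      simp [ho, hma]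
    · simp [ho]

-- ---- stable sort with small integer keys = bucket concatenation ----

lemma insertBy_append_of_before {α : Type} (before : α → α → Bool) (x : α) (p q : List α)
    (hq : ∀ y ∈ q, before x y = true) :
    PySem.List.insertBy before x (p ++ q) = PySem.List.insertBy before x p ++ q := by
  induction p with
  | nil =>
    cases q with
    | nil => simp
    | cons y ys => simp [PySem.List.insertBy, hq y (by simp)]
  | cons a p ih =>
    simp only [List.cons_append, PySem.List.insertBy]
    cases h : before x a
    · simp [ih]
    · simp

def pvBuckets (key : String → Int) (n : Nat) (xs : List String) : List String :=
  (List.range n).flatMap (fun (i : Nat) => xs.filter (fun x => key x == (i : Int)))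

lemma key_mem_buckets {key : String → Int} {n : Nat} {xs : List String} {y : String}
    (hy : y ∈ pvBuckets key n xs) : ∃ i : Nat, i < n ∧ key y = i := by
  unfold pvBuckets at hy
  rcases List.mem_flatMap.mp hy with ⟨i, hi, hmem⟩
  exact ⟨i, List.mem_range.mp hi, by simpa using (List.mem_filter.mp hmem).2⟩

lemma buckets_succ (key : String → Int) (n : Nat) (ys : List String) :
    pvBuckets key (n + 1) ys
      = pvBuckets key n ys ++ ys.filter (fun y => key y == (n : Int)) := by
  unfold pvBuckets
  rw [List.range_succ, List.flatMap_append]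
  simp

lemma insertBy_buckets (key : String → Int) (n : Nat) (xs : List String) (x : String)
    (h0 : 0 ≤ key x) (hn : key x < n) :
    PySem.List.insertBy (fun a b => decide (key a < key b)) x (pvBuckets key n xs)
      = pvBuckets key n (xs ++ [x]) := by
  induction n with
  | zero => omega
  | succ n ih =>
    rw [buckets_succ, buckets_succ]
    have hfilter : ∀ i : Int, (xs ++ [x]).filter (fun y => key y == i)
        = xs.filter (fun y => key y == i) ++ (if key x = i then [x] else []) := by
      intro i
      rw [List.filter_append]
      by_cases h : key x = i <;> simp [h]
    by_cases hx : key x = n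
    · -- x goes to the end of the last bucket
      have hall : ∀ y ∈ pvBuckets key n xs ++ xs.filter (fun y => key y == (n : Int)),
          (fun a b => decide (key a < key b)) x y = false := by
        intro y hy
        rcases List.mem_append.mp hy with hy | hy
        · rcases key_mem_buckets hy with ⟨i, hi, hki⟩
          simp only [decide_eq_false_iff_not]
          omega
        · have := (List.mem_filter.mp hy).2
          simp only [beq_iff_eq] at this
          simp only [decide_eq_false_iff_not]
          omega
      rw [PySem.List.insertBy_of_forall_not_before _ _ _ hall]
      have h1 : pvBuckets key n (xs ++ [x]) = pvBuckets key n xs := by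
        unfold pvBuckets
        apply List.flatMap_congr
        intro i hi
        rw [hfilter]
        have : ¬ key x = (i : Int) := by
          have := List.mem_range.mp hi
          omega
        simp [this]
      rw [h1, hfilter]
      simp [hx]
    · -- x goes into an earlier bucket; the last bucket is untouched
      have hq : ∀ y ∈ xs.filter (fun y => key y == (n : Int)),
          (fun a b => decide (key a < key b)) x y = true := by
        intro y hy
        have := (List.mem_filter.mp hy).2
        simp only [beq_iff_eq] at this
        simp only [decide_eq_true_eq]
        omega
      rw [insertBy_append_of_before _ _ _ _ hq, ih (by omega), hfilter]
      simp [hx]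

lemma sorted_eq_buckets (key : String → Int) (n : Nat) (xs : List String)
    (h : ∀ x ∈ xs, 0 ≤ key x ∧ key x < n) :
    PySem.List.sorted xs key false = pvBuckets key n xs := by
  rw [PySem.List.sorted_eq_foldl_insertBy]
  induction xs using List.reverseRecOn with
  | nil => simp [pvBuckets]
  | append_singleton xs x ih =>
    rw [List.foldl_append, List.foldl_cons, List.foldl_nil]
    rw [ih (fun y hy => h y (by simp [hy]))]
    exact insertBy_buckets key n xs x (h x (by simp)).1 (h x (by simp)).2

-- the rank dict built from enumerate([a,b,c,e]) looked up with default 4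
lemma rank_getD (a b c e m : String) :
    ((PySem.List.enumerate [a, b, c, e]).foldl
        (fun acc p => acc.insert p.2 p.1) (PySem.Dict.empty : PySem.Dict String Int)).getD m 4
      = (if m = e then 3 else if m = c then 2 else if m = b then 1 else if m = a then 0 else 4) := by
  simp only [PySem.List.enumerate_cons, PySem.List.enumerate_nil, List.foldl_cons, List.foldl_nil]
  norm_num [PySem.Dict.getD_insert, PySem.Dict.getD_empty]

-- buckets of the rank key = ranked models in order, then the unranked ones
lemma buckets_eq_order (d : List String) (a b c e : String)
    (hnd : ([a, b, c, e] : List String).Nodup) :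
    pvBuckets (fun m => if m = e then (3:Int) else if m = c then 2 else if m = b then 1 else if m = a then 0 else 4) 5 d
      = (([a, b, c, e] : List String).flatMap (fun o => d.filter (fun m => m == o)))
          ++ d.filter (fun m => !(([a, b, c, e] : List String).contains m)) := by
  obtain ⟨hab, hac, hae, hbc, hbe, hce⟩ :
      a ≠ b ∧ a ≠ c ∧ a ≠ e ∧ b ≠ c ∧ b ≠ e ∧ c ≠ e := by
    simp [List.nodup_cons] at hnd
    tauto
  unfold pvBuckets
  have hrange : List.range 5 = [0, 1, 2, 3, 4] := by decide
  rw [hrange]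
  simp only [List.flatMap_cons, List.flatMap_nil, List.append_nil, List.append_assoc]
  congr 1
  · apply List.filter_congr
    intro m _
    by_cases h1 : m = a <;> by_cases h2 : m = b <;> by_cases h3 : m = c <;> by_cases h4 : m = e <;>
      simp_all
  congr 1
  · apply List.filter_congr
    intro m _
    by_cases h1 : m = a <;> by_cases h2 : m = b <;> by_cases h3 : m = c <;> by_cases h4 : m = e <;>
      simp_all
  congr 1
  · apply List.filter_congr
    intro m _
    by_cases h1 : m = a <;> by_cases h2 : m = b <;> by_cases h3 : m = c <;> by_cases h4 : m = e <;>
      simp_all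
  congr 1
  · apply List.filter_congr
    intro m _
    by_cases h1 : m = a <;> by_cases h2 : m = b <;> by_cases h3 : m = c <;> by_cases h4 : m = e <;>
      simp_all
  · apply List.filter_congr
    intro m _
    by_cases h1 : m = a <;> by_cases h2 : m = b <;> by_cases h3 : m = c <;> by_cases h4 : m = e <;>
      simp_all

-- one effective order [a,b,c,e]: A's remaining loops = B's stable sort by rank
lemma case_lemma (avail : List String) (a b c e : String)
    (hnd : ([a, b, c, e] : List String).Nodup) :
    avail.foldl (fun acc m => if !(acc.contains m) then acc ++ [m] else acc)
        (([a, b, c, e] : List String).filter (fun m => avail.contains m))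
      = PySem.List.sorted (PySem.List.dedup avail)
          (fun m => ((PySem.List.enumerate [a, b, c, e]).foldl
              (fun acc p => acc.insert p.2 p.1) (PySem.Dict.empty : PySem.Dict String Int)).getD m
            ((([a, b, c, e] : List String).length : Nat) : Int)) false := by
  have hlen : ((([a, b, c, e] : List String).length : Nat) : Int) = 4 := by simp
  have hk : (fun m => ((PySem.List.enumerate [a, b, c, e]).foldl
        (fun acc p => acc.insert p.2 p.1) (PySem.Dict.empty : PySem.Dict String Int)).getD m
        ((([a, b, c, e] : List String).length : Nat) : Int))
      = (fun m => if m = e then (3:Int) else if m = c then 2 else if m = b then 1 else if m = a then 0 else 4) := by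
    funext m
    rw [hlen]
    exact rank_getD a b c e m
  rw [hk, main_identity, sorted_eq_buckets _ 5 _ (by
      intro x _
      refine ⟨?_, ?_⟩ <;> split_ifs <;> omega)]
  exact (buckets_eq_order (PySem.List.dedup avail) a b c e hnd).symm

-- ===== VERDICT (by name: the statement is the Claim_ definition above) =====
theorem prioritize_models_for_query_spec : Claim_equal_prioritize_models_for_query := by
  intro query_type complexity available_models _
  unfold Spec_prioritize_models_for_query prioritize_models_for_query prioritize_models_for_query_alt
  have hcases := getD_mapping_cases query_type
  unfold pvMapping pvDflt at hcases
  by_cases hc : complexity ≥ 8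
  · simp only [hc, if_true]
    rw [PySem.List.foldl_append_if_eq_filter, List.nil_append]
    rw [blend_loop_id _ _ _ (by
      rcases hcases with h | h | h <;> rw [h] <;> intro m hm <;> simp at hm ⊢ <;> tauto)]
    exact case_lemma available_models _ _ _ _ (by decide)
  · simp only [hc, if_false]
    rcases hcases with h | h | h <;> rw [h] <;>
      exact case_lemma available_models _ _ _ _ (by decide)
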